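-- pv_equiv track=rewrite | github.com/gvpkumar27/genaiops-rag-lab | app/__main__.py | _diversify_hits_by_source
-- ===== SOURCE A (Python) =====
-- def _diversify_hits_by_source(
--     hits: list[dict],
--     limit: int,
--     per_source_cap: int = 2,
-- ) -> list[dict]:
--     buckets: dict[str, list[dict]] = {}
--     source_order: list[str] = []
--     for hit in hits:
--         source = str(hit.get("source", "unknown"))
--         if source not in buckets:
--             buckets[source] = []
--             source_order.append(source)
--         if len(buckets[source]) < per_source_cap:
--             buckets[source].append(hit)
--
--     selected: list[dict] = []
--     round_index = 0
--     while len(selected) < limit: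
--         made_progress = False
--         for source in source_order:
--             items = buckets[source]
--             if round_index < len(items):
--                 selected.append(items[round_index])
--                 made_progress = True
--                 if len(selected) >= limit:
--                     break
--         if not made_progress:
--             break
--         round_index += 1
--     return selected
-- ===== SOURCE B (Python) =====
-- def _diversify_hits_by_source(
--     hits: list[dict],
--     limit: int,
--     per_source_cap: int = 2,
-- ) -> list[dict]:
--     # One pass: tag each kept hit with a single integer sort key
--     # rank_within_source * n + first_appearance_index_of_source (unique, since
--     # the index is always < n); sorting by that key IS the round-robin order.
--     n = len(hits) + 1
--     first_seen: dict[str, int] = {}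
--     counts: dict[str, int] = {}
--     keyed: list[tuple[int, dict]] = []
--     for hit in hits:
--         source = str(hit.get("source", "unknown"))
--         j = first_seen.setdefault(source, len(first_seen))
--         rank = counts.get(source, 0)
--         if rank < per_source_cap:
--             counts[source] = rank + 1
--             keyed.append((rank * n + j, hit))
--     keyed.sort(key=lambda e: e[0])
--     return [hit for _, hit in keyed[:max(limit, 0)]]
-- ===== Notes on version B (the rewrite author's own statement) =====
-- stated objective: alternative
-- what changed: Replaces the bucket-building pass plus the round_index/made_progress round-robin while-loop by a single tagging pass that gives each kept hit one integer sort key rank*n+first_appearance_index, followed by a sort on that key and a clamped slice.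
import Mathlib
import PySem

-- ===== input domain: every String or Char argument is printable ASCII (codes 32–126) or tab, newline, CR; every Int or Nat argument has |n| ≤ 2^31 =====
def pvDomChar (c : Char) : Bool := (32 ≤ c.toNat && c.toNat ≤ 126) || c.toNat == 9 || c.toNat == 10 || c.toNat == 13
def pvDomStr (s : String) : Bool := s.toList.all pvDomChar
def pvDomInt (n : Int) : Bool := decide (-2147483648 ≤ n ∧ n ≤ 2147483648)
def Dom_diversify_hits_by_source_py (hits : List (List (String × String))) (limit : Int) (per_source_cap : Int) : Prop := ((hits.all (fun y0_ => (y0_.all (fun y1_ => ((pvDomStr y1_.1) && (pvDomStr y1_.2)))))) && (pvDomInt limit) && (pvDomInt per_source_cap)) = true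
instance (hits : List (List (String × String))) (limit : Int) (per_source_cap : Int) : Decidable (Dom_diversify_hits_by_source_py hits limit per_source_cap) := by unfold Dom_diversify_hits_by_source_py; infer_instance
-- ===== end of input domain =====

-- B replaces A's bucket dict + round_index/made_progress round-robin while-loop by one tagging
-- pass (each kept hit gets the single integer key rank*n + first-appearance-index of its source)
-- followed by a sort on that key and a clamped slice (objective: alternative).

-- shared by both ports: str(hit.get("source", "unknown")) — first-match lookup on the assoc list
def pvGetSource (hit : List (String × String)) : String :=
  match hit.find? (fun p => p.1 == "source") with
  | some p => p.2
  | none => "unknown"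

-- ===== PORT A =====
-- first for-loop of A: build buckets (capped at per_source_cap) and source_order
def pvAStep (cap : Int) (st : PySem.Dict String (List (List (String × String))) × List String)
    (hit : List (String × String)) :
    PySem.Dict String (List (List (String × String))) × List String :=
  let source := pvGetSource hit
  let st' := if (st.1.get? source).isNone then (st.1.insert source [], st.2 ++ [source]) else st
  let items := st'.1.getD source []
  if (items.length : Int) < cap then (st'.1.insert source (items ++ [hit]), st'.2) else st'

-- inner 'for source in source_order' loop; returns (selected, made_progress, broke-at-limit)
def pvAInner (buckets : PySem.Dict String (List (List (String × String)))) (limit : Int)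
    (r : Int) : List String → List (List (String × String)) → Bool →
    (List (List (String × String)) × Bool × Bool)
  | [], sel, mp => (sel, mp, false)
  | s :: rest, sel, mp =>
    let items := buckets.getD s []
    if r < (items.length : Int) then
      let sel' := sel ++ [PySem.List.pyGetD items r []]
      if limit ≤ (sel'.length : Int) then (sel', true, true)
      else pvAInner buckets limit r rest sel' true
    else pvAInner buckets limit r rest sel mp

-- 'while len(selected) < limit' loop; fuel makes the same iteration total
def pvALoop (buckets : PySem.Dict String (List (List (String × String)))) (order : List String)
    (limit : Int) : Nat → List (List (String × String)) → Int → List (List (String × String))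
  | 0, sel, _ => sel
  | f + 1, sel, r =>
    if (sel.length : Int) < limit then
      match pvAInner buckets limit r order sel false with
      | (sel', mp, stop) =>
        if stop then sel'
        else if mp then pvALoop buckets order limit f sel' (r + 1)
        else sel'
    else sel

def diversify_hits_by_source_py (hits : List (List (String × String))) (limit : Int)
    (per_source_cap : Int) : List (List (String × String)) :=
  let st := hits.foldl (pvAStep per_source_cap) (PySem.Dict.empty, [])
  pvALoop st.1 st.2 limit (hits.length + 1) [] 0

-- ===== PORT B =====
-- one tagging pass of Source B: first_seen (source → first-appearance index), counts
-- (source → number of hits kept so far) and keyed (the tagged kept hits, in hits order);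
-- 'j = first_seen.setdefault(source, len(first_seen))' is ported by hand as a match on get?
-- (exact: setdefault returns the existing value, else inserts and returns the default)
def pvBStep (n cap : Int)
    (st : PySem.Dict String Int × PySem.Dict String Int × List (Int × List (String × String)))
    (hit : List (String × String)) :
    PySem.Dict String Int × PySem.Dict String Int × List (Int × List (String × String)) :=
  let source := pvGetSource hit
  let jf : Int × PySem.Dict String Int :=
    match st.1.get? source with
    | some j => (j, st.1)
    | none => ((st.1.size : Int), st.1.insert source (st.1.size : Int))
  let rank := st.2.1.getD source 0
  if rank < cap then
    (jf.2, st.2.1.insert source (rank + 1), st.2.2 ++ [(rank * n + jf.1, hit)])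
  else
    (jf.2, st.2.1, st.2.2)

def diversify_hits_by_source_py_alt (hits : List (List (String × String))) (limit : Int)
    (per_source_cap : Int) : List (List (String × String)) :=
  let n : Int := (hits.length : Int) + 1
  let st := hits.foldl (pvBStep n per_source_cap) (PySem.Dict.empty, PySem.Dict.empty, [])
  let keyed := PySem.List.sorted st.2.2 (fun e => e.1)
  (PySem.List.slice keyed none (some (max limit 0))).map (fun e => e.2)

-- ===== PRECONDITION & SPEC =====
def Spec_diversify_hits_by_source_py (hits : List (List (String × String))) (limit : Int) (per_source_cap : Int) (out : List (List (String × String))) : Prop := out = diversify_hits_by_source_py_alt hits limit per_source_cap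
instance (hits : List (List (String × String))) (limit : Int) (per_source_cap : Int) (out : List (List (String × String))) : Decidable (Spec_diversify_hits_by_source_py hits limit per_source_cap out) := by unfold Spec_diversify_hits_by_source_py; infer_instance

-- ===== CLAIM (what is proved, stated in full; the proofs are below) =====
def Claim_equal_diversify_hits_by_source_py : Prop := ∀ (hits : List (List (String × String))) (limit : Int) (per_source_cap : Int), Dom_diversify_hits_by_source_py hits limit per_source_cap → Spec_diversify_hits_by_source_py hits limit per_source_cap (diversify_hits_by_source_py hits limit per_source_cap)

-- ===== LEMMAS AND PROOFS =====

-- common mathematical description of both programs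
def pvFull (hits : List (List (String × String))) (s : String) : List (List (String × String)) :=
  hits.filter (fun h => pvGetSource h == s)

def pvOrd (hits : List (List (String × String))) : List String :=
  PySem.List.dedup (hits.map pvGetSource)

def pvGrp (hits : List (List (String × String))) (capN : Nat) (s : String) :
    List (List (String × String)) := (pvFull hits s).take capN

def pvRow (hits : List (List (String × String))) (capN : Nat) (r : Nat) :
    List (List (String × String)) :=
  (pvOrd hits).filterMap (fun s => (pvGrp hits capN s)[r]?)

def pvFlatFrom (hits : List (List (String × String))) (capN : Nat) (r : Nat) :
    List (List (String × String)) :=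
  (List.range' r (capN - r)).flatMap (pvRow hits capN)

-- invariant of A's first loop
def pvInvA (capN : Nat) (p : List (List (String × String)))
    (d : PySem.Dict String (List (List (String × String)))) (o : List String) : Prop :=
  o = pvOrd p ∧ ∀ s, d.get? s = if s ∈ o then some (pvGrp p capN s) else none

theorem pvDedup_concat {xs : List String} {x : String} :
    PySem.List.dedup (xs ++ [x]) = if x ∈ xs then PySem.List.dedup xs else PySem.List.dedup xs ++ [x] := by
  have h1 : PySem.List.dedup (xs ++ [x]) = PySem.Set.add (PySem.List.dedup xs) x := by
    simp [PySem.List.dedup, PySem.Set.ofList, List.foldl_append]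
  rw [h1]
  unfold PySem.Set.add
  by_cases hx : x ∈ xs
  · rw [if_pos, if_pos hx]
    simp [PySem.Set.contains, hx]
  · rw [if_neg, if_neg hx]
    simp [PySem.Set.contains, hx]

theorem pvOrd_concat (p : List (List (String × String))) (h : List (String × String)) :
    pvOrd (p ++ [h]) = if pvGetSource h ∈ pvOrd p then pvOrd p else pvOrd p ++ [pvGetSource h] := by
  unfold pvOrd
  rw [List.map_append, List.map_singleton, pvDedup_concat]
  by_cases hx : pvGetSource h ∈ List.map pvGetSource p
  · rw [if_pos hx, if_pos (by simpa [PySem.List.mem_dedup] using hx)]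
  · rw [if_neg hx, if_neg (by simpa [PySem.List.mem_dedup] using hx)]

theorem pvFull_concat (p : List (List (String × String))) (h : List (String × String)) (s : String) :
    pvFull (p ++ [h]) s = pvFull p s ++ (if pvGetSource h = s then [h] else []) := by
  unfold pvFull
  rw [List.filter_append]
  by_cases hx : pvGetSource h = s
  · simp [hx]
  · simp [hx]

theorem pvFull_nil_of_not_mem {p : List (List (String × String))} {s : String}
    (hs : s ∉ pvOrd p) : pvFull p s = [] := by
  rw [pvOrd, PySem.List.mem_dedup] at hs
  rw [pvFull, List.filter_eq_nil_iff]
  intro h hh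
  simp only [beq_iff_eq]
  intro he
  exact hs (he ▸ List.mem_map_of_mem hh)

theorem pvTake_concat {α : Type} (l : List α) (x : α) (n : Nat) :
    (l ++ [x]).take n = if l.length < n then l ++ [x] else l.take n := by
  by_cases hl : l.length < n
  · rw [if_pos hl, List.take_of_length_le (by simp; omega)]
  · rw [if_neg hl, List.take_append_of_le_length (by omega)]

theorem pvStepA {cap : Int} {p : List (List (String × String))}
    {d : PySem.Dict String (List (List (String × String)))} {o : List String}
    (hi : pvInvA cap.toNat p d o) (h : List (String × String)) :
    pvInvA cap.toNat (p ++ [h]) (pvAStep cap (d, o) h).1 (pvAStep cap (d, o) h).2 := by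
  obtain ⟨ho, hg⟩ := hi
  by_cases c1 : pvGetSource h ∈ o
  · -- known source: no new bucket, no order change
    have hget : d.get? (pvGetSource h) = some (pvGrp p cap.toNat (pvGetSource h)) := by
      rw [hg, if_pos c1]
    have hfull0 : pvFull (p ++ [h]) (pvGetSource h) = pvFull p (pvGetSource h) ++ [h] := by
      rw [pvFull_concat, if_pos rfl]
    have hord : pvOrd (p ++ [h]) = pvOrd p := by
      rw [pvOrd_concat, if_pos (ho ▸ c1)]
    have hlen : ((d.getD (pvGetSource h) []).length : Int) =
        ((min (pvFull p (pvGetSource h)).length cap.toNat : Nat) : Int) := by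
      rw [PySem.Dict.getD_eq_get?_getD, hget]
      simp [pvGrp]
      omega
    by_cases clen : ((pvFull p (pvGetSource h)).length : Int) < (cap.toNat : Int)
    · have hstep : pvAStep cap (d, o) h =
          (d.insert (pvGetSource h) (pvGrp p cap.toNat (pvGetSource h) ++ [h]), o) := by
        simp only [pvAStep, hget, Option.isNone_some, Bool.false_eq_true, if_false]
        rw [if_pos (by rw [hlen]; omega)]
        rw [PySem.Dict.getD_eq_get?_getD, hget]
        rfl
      rw [hstep]
      refine ⟨by simpa [hord] using ho, fun s => ?_⟩
      dsimp only
      rw [PySem.Dict.get?_insert]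
      by_cases hss : s = pvGetSource h
      · subst hss
        rw [if_pos rfl, if_pos c1]
        have htk : List.take cap.toNat (pvFull p (pvGetSource h)) = pvFull p (pvGetSource h) :=
          List.take_of_length_le (by omega)
        have hgoal : pvGrp (p ++ [h]) cap.toNat (pvGetSource h) =
            pvGrp p cap.toNat (pvGetSource h) ++ [h] := by
          rw [pvGrp, hfull0, pvTake_concat, if_pos (by omega), pvGrp, htk]
        rw [hgoal]
      · rw [if_neg hss, hg]
        have : pvFull (p ++ [h]) s = pvFull p s := by
          rw [pvFull_concat, if_neg (fun he => hss (he.symm)), List.append_nil]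
        simp only [pvGrp]
        rw [this]
    · have hstep : pvAStep cap (d, o) h = (d, o) := by
        simp only [pvAStep, hget, Option.isNone_some, Bool.false_eq_true, if_false]
        rw [if_neg (by rw [hlen]; omega)]
      rw [hstep]
      refine ⟨by simpa [hord] using ho, fun s => ?_⟩
      dsimp only
      rw [hg]
      by_cases hss : s = pvGetSource h
      · subst hss
        rw [if_pos c1, if_pos c1]
        have hgoal : pvGrp (p ++ [h]) cap.toNat (pvGetSource h) =
            pvGrp p cap.toNat (pvGetSource h) := by
          rw [pvGrp, hfull0, pvTake_concat, if_neg (by omega), pvGrp]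
        rw [hgoal]
      · have : pvFull (p ++ [h]) s = pvFull p s := by
          rw [pvFull_concat, if_neg (fun he => hss (he.symm)), List.append_nil]
        simp only [pvGrp]
        rw [this]
  · -- new source
    have hget : d.get? (pvGetSource h) = none := by rw [hg, if_neg c1]
    have hfullnil : pvFull p (pvGetSource h) = [] :=
      pvFull_nil_of_not_mem (ho ▸ c1)
    have hfull0 : pvFull (p ++ [h]) (pvGetSource h) = [h] := by
      rw [pvFull_concat, if_pos rfl, hfullnil, List.nil_append]
    have hord : pvOrd (p ++ [h]) = pvOrd p ++ [pvGetSource h] := by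
      rw [pvOrd_concat, if_neg (ho ▸ c1)]
    have hg1 : ∀ s, ((d.insert (pvGetSource h) []).get? s) =
        if s = pvGetSource h then some [] else d.get? s := fun s => PySem.Dict.get?_insert _ _ _ _
    have hgetD : (d.insert (pvGetSource h) []).getD (pvGetSource h) [] = [] :=
      PySem.Dict.getD_insert_self _ _ _ _
    by_cases clen : (0 : Int) < cap
    · have hstep : pvAStep cap (d, o) h =
          (d.insert (pvGetSource h) [h], o ++ [pvGetSource h]) := by
        simp only [pvAStep, hget, Option.isNone_none, if_true]
        rw [hgetD]
        rw [if_pos (by simpa using clen)]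
        rw [PySem.Dict.insert_insert_self]
        rfl
      rw [hstep]
      refine ⟨by rw [hord, ho], fun s => ?_⟩
      dsimp only
      rw [PySem.Dict.get?_insert]
      by_cases hss : s = pvGetSource h
      · subst hss
        rw [if_pos rfl, if_pos (by simp)]
        rw [pvGrp, hfull0, List.take_of_length_le (by simp; omega)]
      · rw [if_neg hss, hg]
        have hmem : (s ∈ o ++ [pvGetSource h]) ↔ s ∈ o := by simp [hss]
        have : pvFull (p ++ [h]) s = pvFull p s := by
          rw [pvFull_concat, if_neg (fun he => hss (he.symm)), List.append_nil]
        by_cases hso : s ∈ o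
        · rw [if_pos hso, if_pos (hmem.mpr hso), pvGrp, pvGrp, this]
        · rw [if_neg hso, if_neg (fun hc => hso (hmem.mp hc))]
    · have hcap0 : cap.toNat = 0 := by omega
      have hstep : pvAStep cap (d, o) h =
          (d.insert (pvGetSource h) [], o ++ [pvGetSource h]) := by
        simp only [pvAStep, hget, Option.isNone_none, if_true]
        rw [hgetD]
        rw [if_neg (by simpa using clen)]
      rw [hstep]
      refine ⟨by rw [hord, ho], fun s => ?_⟩
      dsimp only
      rw [PySem.Dict.get?_insert]
      by_cases hss : s = pvGetSource h
      · subst hss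
        rw [if_pos rfl, if_pos (by simp), pvGrp, hcap0, List.take_zero]
      · rw [if_neg hss, hg]
        have hmem : (s ∈ o ++ [pvGetSource h]) ↔ s ∈ o := by simp [hss]
        have : pvFull (p ++ [h]) s = pvFull p s := by
          rw [pvFull_concat, if_neg (fun he => hss (he.symm)), List.append_nil]
        by_cases hso : s ∈ o
        · rw [if_pos hso, if_pos (hmem.mpr hso), pvGrp, pvGrp, this]
        · rw [if_neg hso, if_neg (fun hc => hso (hmem.mp hc))]

theorem pvFoldA (cap : Int) (l : List (List (String × String))) :
    ∀ (p : List (List (String × String))) (d : PySem.Dict String (List (List (String × String))))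
      (o : List String), pvInvA cap.toNat p d o →
      pvInvA cap.toNat (p ++ l) (l.foldl (pvAStep cap) (d, o)).1 (l.foldl (pvAStep cap) (d, o)).2 := by
  induction l with
  | nil => intro p d o hi; simpa using hi
  | cons hh t ih =>
    intro p d o hi
    have h1 := pvStepA hi hh
    have h2 := ih (p ++ [hh]) (pvAStep cap (d, o) hh).1 (pvAStep cap (d, o) hh).2 h1
    simpa [List.append_assoc] using h2

-- row facts
theorem pvRow_nil_of_big (hits : List (List (String × String))) (capN r : Nat)
    (hr : hits.length ≤ r) : pvRow hits capN r = [] := by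
  rw [pvRow, List.filterMap_eq_nil_iff]
  intro s _
  apply List.getElem?_eq_none
  have h1 : (pvFull hits s).length ≤ hits.length := List.length_filter_le _ _
  have h2 : (pvGrp hits capN s).length ≤ (pvFull hits s).length := by
    simp [pvGrp]
  omega

theorem pvRow_nil_mono (hits : List (List (String × String))) (capN : Nat) {r r' : Nat}
    (h : pvRow hits capN r = []) (hrr : r ≤ r') : pvRow hits capN r' = [] := by
  rw [pvRow, List.filterMap_eq_nil_iff] at h ⊢
  intro s hs
  apply List.getElem?_eq_none
  have := h s hs
  have hlen : (pvGrp hits capN s).length ≤ r := by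
    by_contra hc
    rw [List.getElem?_eq_getElem (by omega)] at this
    simp at this
  omega

theorem pvFlatFrom_nil (hits : List (List (String × String))) (capN r : Nat)
    (h : ∀ r', r ≤ r' → pvRow hits capN r' = []) : pvFlatFrom hits capN r = [] := by
  rw [pvFlatFrom, List.flatMap_eq_nil_iff]
  intro x hx
  exact h x (List.mem_range'_1.mp hx).1

theorem pvFlatFrom_cons (hits : List (List (String × String))) (capN r : Nat) (hr : r < capN) :
    pvFlatFrom hits capN r = pvRow hits capN r ++ pvFlatFrom hits capN (r + 1) := by
  rw [pvFlatFrom, pvFlatFrom]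
  have h1 : capN - r = (capN - (r + 1)) + 1 := by omega
  rw [h1, List.range'_succ, List.flatMap_cons]

theorem pvRow_nonempty_lt_cap {hits : List (List (String × String))} {capN r : Nat}
    (h : pvRow hits capN r ≠ []) : r < capN := by
  by_contra hc
  apply h
  rw [pvRow, List.filterMap_eq_nil_iff]
  intro s _
  apply List.getElem?_eq_none
  have : (pvGrp hits capN s).length ≤ capN := by simp [pvGrp]
  omega

-- A's inner loop
theorem pvInner_spec (hits : List (List (String × String))) (capN : Nat) (limit : Int)
    (d : PySem.Dict String (List (List (String × String)))) (r : Nat) :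
    ∀ (L : List String) (sel : List (List (String × String))) (mp : Bool),
      (∀ s ∈ L, d.getD s [] = pvGrp hits capN s) → (sel.length : Int) < limit →
      pvAInner d limit (r : Int) L sel mp =
        (sel ++ (L.filterMap (fun s => (pvGrp hits capN s)[r]?)).take (limit.toNat - sel.length),
         mp || !(L.filterMap (fun s => (pvGrp hits capN s)[r]?)).isEmpty,
         decide (limit ≤ (sel.length : Int) + (L.filterMap (fun s => (pvGrp hits capN s)[r]?)).length)) := by
  intro L
  induction L with
  | nil =>
    intro sel mp _ hsel
    simp [pvAInner]
    omega
  | cons s L ih =>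
    intro sel mp hL hsel
    have hds : d.getD s [] = pvGrp hits capN s := hL s (by simp)
    have hLt : ∀ s' ∈ L, d.getD s' [] = pvGrp hits capN s' := fun s' hs' => hL s' (by simp [hs'])
    simp only [pvAInner, hds]
    by_cases hin : ((r : Nat) : Int) < ((pvGrp hits capN s).length : Int)
    · have hr : r < (pvGrp hits capN s).length := by exact_mod_cast hin
      have hget : (pvGrp hits capN s)[r]? = some ((pvGrp hits capN s)[r]'hr) :=
        List.getElem?_eq_getElem hr
      have hgetD : PySem.List.pyGetD (pvGrp hits capN s) ((r : Nat) : Int) [] =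
          (pvGrp hits capN s)[r]'hr := by
        rw [PySem.List.pyGetD_natCast, List.getD_eq_getElem?_getD, hget]
        rfl
      rw [if_pos hin, List.filterMap_cons_some (f := fun s' => (pvGrp hits capN s')[r]?) hget]
      by_cases hstop : limit ≤ ((sel.length : Int) + 1)
      · rw [if_pos (by simp; omega)]
        have hδ : limit.toNat - sel.length = 1 := by omega
        rw [hδ, List.take_succ_cons, List.take_zero, hgetD]
        simp only [Prod.mk.injEq, List.isEmpty_cons, List.length_cons]
        refine ⟨by simp, by simp, ?_⟩
        rw [eq_comm, decide_eq_true_eq]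
        push_cast
        omega
      · rw [if_neg (by simp; omega)]
        rw [ih (sel ++ [PySem.List.pyGetD (pvGrp hits capN s) ((r : Nat) : Int) []]) true hLt
          (by simp; omega)]
        simp only [Prod.mk.injEq, List.length_append, List.length_cons,
          List.isEmpty_cons, hgetD]
        refine ⟨?_, by simp, ?_⟩
        · have hδ : limit.toNat - sel.length = (limit.toNat - (sel.length + 1)) + 1 := by omega
          rw [hδ, List.take_succ_cons, List.append_assoc]
          rfl
        · rw [decide_eq_decide]
          push_cast
          simp only [List.length_nil]
          omega
    · have hget : (pvGrp hits capN s)[r]? = none :=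
        List.getElem?_eq_none (by exact_mod_cast not_lt.mp hin)
      rw [if_neg hin, List.filterMap_cons_none (f := fun s' => (pvGrp hits capN s')[r]?) hget,
        ih sel mp hLt hsel]

-- A's outer loop
theorem pvLoop_spec (hits : List (List (String × String))) (cap limit : Int)
    (d : PySem.Dict String (List (List (String × String))))
    (hd : ∀ s ∈ pvOrd hits, d.getD s [] = pvGrp hits cap.toNat s) :
    ∀ (f : Nat) (r : Nat) (sel : List (List (String × String))),
      hits.length + 1 ≤ f + r →
      pvALoop d (pvOrd hits) limit f sel (r : Int) =
        sel ++ (pvFlatFrom hits cap.toNat r).take (limit.toNat - sel.length) := by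
  intro f
  induction f with
  | zero =>
    intro r sel hfr
    have hrows : ∀ r', r ≤ r' → pvRow hits cap.toNat r' = [] := fun r' hr' =>
      pvRow_nil_of_big hits cap.toNat r' (by omega)
    rw [pvALoop, pvFlatFrom_nil hits cap.toNat r hrows]
    simp
  | succ f ih =>
    intro r sel hfr
    rw [pvALoop]
    by_cases hguard : (sel.length : Int) < limit
    · rw [if_pos hguard]
      have hrow := pvInner_spec hits cap.toNat limit d r (pvOrd hits) sel false hd hguard
      have hrowdef : (pvOrd hits).filterMap (fun s => (pvGrp hits cap.toNat s)[r]?) =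
          pvRow hits cap.toNat r := rfl
      rw [hrowdef] at hrow
      rw [hrow]
      dsimp only
      by_cases hstop : limit ≤ (sel.length : Int) + (pvRow hits cap.toNat r).length
      · rw [if_pos (decide_eq_true hstop)]
        have hδle : limit.toNat - sel.length ≤ (pvRow hits cap.toNat r).length := by omega
        have hne : pvRow hits cap.toNat r ≠ [] := by
          intro hc
          rw [hc] at hstop
          simp at hstop
          omega
        rw [pvFlatFrom_cons hits cap.toNat r (pvRow_nonempty_lt_cap hne),
          List.take_append_of_le_length hδle]
      · rw [if_neg (by simp [decide_eq_false hstop])]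
        by_cases hne : pvRow hits cap.toNat r = []
        · rw [hne]
          have hmp : (false || !(List.isEmpty ([] : List (List (String × String))))) = false := by
            simp
          rw [hmp]
          have hflat : pvFlatFrom hits cap.toNat r = [] :=
            pvFlatFrom_nil hits cap.toNat r (fun r' hr' => pvRow_nil_mono hits cap.toNat hne hr')
          rw [hflat]
          simp
        · have hmp : (false || !(pvRow hits cap.toNat r).isEmpty) = true := by
            simp [hne]
          rw [hmp, if_pos rfl]
          have hrlen : (pvRow hits cap.toNat r).length < limit.toNat - sel.length := by omega
          have htk : (pvRow hits cap.toNat r).take (limit.toNat - sel.length) =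
              pvRow hits cap.toNat r := List.take_of_length_le (by omega)
          rw [htk]
          have hcast : ((r : Int) + 1) = (((r + 1 : Nat)) : Int) := by push_cast; ring
          rw [hcast, ih (r + 1) (sel ++ pvRow hits cap.toNat r) (by omega)]
          rw [pvFlatFrom_cons hits cap.toNat r (pvRow_nonempty_lt_cap hne), List.take_append, htk]
          have hamt : limit.toNat - (sel ++ pvRow hits cap.toNat r).length =
              limit.toNat - sel.length - (pvRow hits cap.toNat r).length := by
            simp
            omega
          rw [hamt, List.append_assoc]
    · rw [if_neg hguard]
      have hδ : limit.toNat - sel.length = 0 := by omega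
      rw [hδ, List.take_zero, List.append_nil]

-- A's value
theorem pvA_eq (hits : List (List (String × String))) (limit cap : Int) :
    diversify_hits_by_source_py hits limit cap =
      (pvFlatFrom hits cap.toNat 0).take limit.toNat := by
  have hinit : pvInvA cap.toNat [] (PySem.Dict.empty) [] := by
    refine ⟨rfl, fun s => ?_⟩
    simp [PySem.Dict.get?_empty]
  have hinv := pvFoldA cap hits [] PySem.Dict.empty [] hinit
  rw [List.nil_append] at hinv
  obtain ⟨ho, hg⟩ := hinv
  have hd : ∀ s ∈ pvOrd hits,
      (hits.foldl (pvAStep cap) (PySem.Dict.empty, [])).1.getD s [] = pvGrp hits cap.toNat s := by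
    intro s hs
    rw [PySem.Dict.getD_eq_get?_getD, hg s, if_pos (ho ▸ hs)]
    rfl
  rw [diversify_hits_by_source_py]
  rw [ho]
  have h0 : (0 : Int) = ((0 : Nat) : Int) := rfl
  rw [h0, pvLoop_spec hits cap limit _ hd (hits.length + 1) 0 [] (by omega)]
  simp

-- ===== B-side lemmas =====

-- the key-tagged matrix, column-wise (in hits order this is what the tagging pass collects,
-- up to permutation) and row-wise (the key-sorted order)
def pvS (p : List (List (String × String))) (capN : Nat) (n : Int) :
    List (Int × List (String × String)) :=
  (PySem.List.enumerate (pvOrd p) 0).flatMap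
    (fun q => (PySem.List.enumerate (pvGrp p capN q.2) 0).map (fun e => (e.1 * n + q.1, e.2)))

def pvKRow (p : List (List (String × String))) (capN : Nat) (n : Int) (r : Nat) :
    List (Int × List (String × String)) :=
  (PySem.List.enumerate (pvOrd p) 0).filterMap
    (fun q => ((pvGrp p capN q.2)[r]?).map (fun h => ((r : Int) * n + q.1, h)))

def pvKT (p : List (List (String × String))) (capN : Nat) (n : Int) :
    List (Int × List (String × String)) :=
  (List.range capN).flatMap (pvKRow p capN n)

-- invariant of B's tagging pass
def pvInvB (n cap : Int) (p : List (List (String × String)))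
    (fs cnt : PySem.Dict String Int) (kd : List (Int × List (String × String))) : Prop :=
  fs.items = (PySem.List.enumerate (pvOrd p) 0).map (fun q => (q.2, q.1)) ∧
  (∀ s, cnt.getD s 0 = ((min (pvFull p s).length cap.toNat : Nat) : Int)) ∧
  kd.Perm (pvS p cap.toNat n)

theorem pvKeys_of_items {fs : PySem.Dict String Int} {p : List (List (String × String))}
    (hfs : fs.items = (PySem.List.enumerate (pvOrd p) 0).map (fun q => (q.2, q.1))) :
    fs.keys = pvOrd p := by
  show fs.items.map (·.1) = pvOrd p
  rw [hfs, List.map_map]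
  have : ((fun x : String × Int => x.1) ∘ fun q : Int × String => (q.2, q.1)) =
      (fun x : Int × String => x.2) := rfl
  rw [this, PySem.List.map_snd_enumerate]

theorem pvOrd_nodup (p : List (List (String × String))) : (pvOrd p).Nodup :=
  PySem.List.nodup_dedup _

-- membership in an enumerate gives the second component's membership
theorem pvSnd_mem_of_mem_enumerate {α : Type} {xs : List α} {s : Int} {q : Int × α}
    (hq : q ∈ PySem.List.enumerate xs s) : q.2 ∈ xs := by
  rw [PySem.List.mem_enumerate_iff] at hq
  obtain ⟨k, hk, rfl⟩ := hq
  exact List.getElem_mem hk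

-- appending an element inside one block of a flatMap is, up to permutation, appending it at the end
theorem pvFlatMap_snoc_perm {α β : Type} [DecidableEq β] (E1 E2 : List α) (q0 : α)
    (f f' : α → List β) (e : β)
    (h1 : ∀ q ∈ E1, f' q = f q) (h2 : ∀ q ∈ E2, f' q = f q) (hq : f' q0 = f q0 ++ [e]) :
    ((E1 ++ q0 :: E2).flatMap f').Perm ((E1 ++ q0 :: E2).flatMap f ++ [e]) := by
  rw [List.flatMap_append, List.flatMap_cons, List.flatMap_append, List.flatMap_cons,
    List.flatMap_congr h1, List.flatMap_congr h2, hq]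
  apply List.perm_iff_count.mpr
  intro x
  simp [List.count_append, List.count_cons]

-- first_seen lookup of an already-seen source: its first-appearance index
theorem pvGet?_of_split {fs : PySem.Dict String Int} {p : List (List (String × String))}
    {o1 o2 : List String} {s : String}
    (hfs : fs.items = (PySem.List.enumerate (pvOrd p) 0).map (fun q => (q.2, q.1)))
    (hsplit : pvOrd p = o1 ++ s :: o2) :
    fs.get? s = some ((o1.length : Int)) := by
  apply PySem.Dict.get?_of_mem_items
  · rw [hfs, hsplit, PySem.List.enumerate_append, PySem.List.enumerate_cons]
    apply List.mem_map.mpr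
    exact ⟨(0 + (o1.length : Int), s), by simp, by simp⟩
  · rw [pvKeys_of_items hfs]
    exact pvOrd_nodup p

-- one step of B's tagging pass preserves the invariant
theorem pvStepB {n cap : Int} {p : List (List (String × String))}
    {fs cnt : PySem.Dict String Int} {kd : List (Int × List (String × String))}
    (hi : pvInvB n cap p fs cnt kd) (h : List (String × String)) :
    pvInvB n cap (p ++ [h]) (pvBStep n cap (fs, cnt, kd) h).1
      (pvBStep n cap (fs, cnt, kd) h).2.1 (pvBStep n cap (fs, cnt, kd) h).2.2 := by
  obtain ⟨hfs, hcnt, hkd⟩ := hi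
  have hnd := pvOrd_nodup p
  by_cases c1 : pvGetSource h ∈ pvOrd p
  · -- already-seen source
    obtain ⟨o1, o2, hsplit⟩ := List.append_of_mem c1
    have hnd' := hnd
    rw [hsplit] at hnd'
    simp [List.nodup_append] at hnd'
    have hs1 : pvGetSource h ∉ o1 := fun hx => (hnd'.2.2 _ hx).1 rfl
    have hs2 : pvGetSource h ∉ o2 := hnd'.2.1.1
    have hget : fs.get? (pvGetSource h) = some ((o1.length : Int)) := pvGet?_of_split hfs hsplit
    have hord : pvOrd (p ++ [h]) = pvOrd p := by rw [pvOrd_concat, if_pos c1]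
    have hfull0 : pvFull (p ++ [h]) (pvGetSource h) = pvFull p (pvGetSource h) ++ [h] := by
      rw [pvFull_concat, if_pos rfl]
    have hfullne : ∀ s, s ≠ pvGetSource h → pvFull (p ++ [h]) s = pvFull p s := by
      intro s hss
      rw [pvFull_concat, if_neg (fun he => hss he.symm), List.append_nil]
    have hrank : cnt.getD (pvGetSource h) 0 =
        ((min (pvFull p (pvGetSource h)).length cap.toNat : Nat) : Int) := hcnt _
    by_cases c2 : (pvFull p (pvGetSource h)).length < cap.toNat
    · -- kept: a new entry is appended
      have hcapeq : cap = ((cap.toNat : Nat) : Int) := by omega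
      have hranklt : cnt.getD (pvGetSource h) 0 < cap := by rw [hrank, hcapeq]; push_cast; omega
      have hrankF : cnt.getD (pvGetSource h) 0 = ((pvFull p (pvGetSource h)).length : Int) := by
        rw [hrank]; push_cast; omega
      have hstep : pvBStep n cap (fs, cnt, kd) h =
          (fs, cnt.insert (pvGetSource h) (cnt.getD (pvGetSource h) 0 + 1),
            kd ++ [(cnt.getD (pvGetSource h) 0 * n + (o1.length : Int), h)]) := by
        simp only [pvBStep, hget]
        rw [if_pos hranklt]
      rw [hstep]
      refine ⟨by rw [hord]; exact hfs, fun s => ?_, ?_⟩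
      · dsimp only
        rw [PySem.Dict.getD_insert]
        by_cases hss : s = pvGetSource h
        · subst hss
          rw [if_pos rfl, hrankF, hfull0]
          simp
          omega
        · rw [if_neg hss, hcnt s, hfullne s hss]
      · -- permutation of the tagged entries
        dsimp only
        have hgrow : pvGrp (p ++ [h]) cap.toNat (pvGetSource h) =
            pvGrp p cap.toNat (pvGetSource h) ++ [h] := by
          rw [pvGrp, hfull0, pvTake_concat, if_pos c2, pvGrp,
            List.take_of_length_le (by omega)]
        have hlengrp : (pvGrp p cap.toNat (pvGetSource h)).length =
            (pvFull p (pvGetSource h)).length := by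
          simp [pvGrp]; omega
        have hgrne : ∀ s, s ≠ pvGetSource h →
            pvGrp (p ++ [h]) cap.toNat s = pvGrp p cap.toNat s := by
          intro s hss
          rw [pvGrp, pvGrp, hfullne s hss]
        set e : Int × List (String × String) :=
          (cnt.getD (pvGetSource h) 0 * n + (o1.length : Int), h) with he
        set f := fun q : Int × String =>
          (PySem.List.enumerate (pvGrp p cap.toNat q.2) 0).map (fun x => (x.1 * n + q.1, x.2))
          with hf
        set f' := fun q : Int × String =>
          (PySem.List.enumerate (pvGrp (p ++ [h]) cap.toNat q.2) 0).map
            (fun x => (x.1 * n + q.1, x.2)) with hf'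
        have hperm : (pvS (p ++ [h]) cap.toNat n).Perm (pvS p cap.toNat n ++ [e]) := by
          rw [pvS, pvS, hord, hsplit, PySem.List.enumerate_append, PySem.List.enumerate_cons]
          have hdecomp : PySem.List.enumerate o1 0 ++
              (0 + (o1.length : Int), pvGetSource h) :: PySem.List.enumerate o2 (0 + (o1.length : Int) + 1) =
              PySem.List.enumerate o1 0 ++
              ((o1.length : Int), pvGetSource h) :: PySem.List.enumerate o2 ((o1.length : Int) + 1) := by
            simp
          rw [hdecomp]
          apply pvFlatMap_snoc_perm (f := f) (f' := f') (e := e)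
          · intro q hq
            have : q.2 ∈ o1 := pvSnd_mem_of_mem_enumerate hq
            rw [hf, hf']
            dsimp only
            rw [hgrne q.2 (fun heq => hs1 (heq ▸ this))]
          · intro q hq
            have : q.2 ∈ o2 := pvSnd_mem_of_mem_enumerate hq
            rw [hf, hf']
            dsimp only
            rw [hgrne q.2 (fun heq => hs2 (heq ▸ this))]
          · rw [hf, hf']
            dsimp only
            rw [hgrow, PySem.List.enumerate_append, List.map_append]
            simp only [PySem.List.enumerate_cons, PySem.List.enumerate_nil, List.map_cons,
              List.map_nil]
            rw [he, hrankF, hlengrp]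
            simp
        exact (hkd.append_right [e]).trans hperm.symm
    · -- cap reached (or nonpositive cap): nothing is appended
      have hranknlt : ¬ cnt.getD (pvGetSource h) 0 < cap := by
        rw [hrank]
        by_cases hc : 0 < cap
        · have : cap = ((cap.toNat : Nat) : Int) := by omega
          rw [this]; push_cast; omega
        · push_cast; omega
      have hstep : pvBStep n cap (fs, cnt, kd) h = (fs, cnt, kd) := by
        simp only [pvBStep, hget]
        rw [if_neg hranknlt]
      rw [hstep]
      refine ⟨by rw [hord]; exact hfs, fun s => ?_, ?_⟩
      · dsimp only
        by_cases hss : s = pvGetSource h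
        · subst hss
          rw [hcnt _, hfull0]
          simp
          omega
        · rw [hcnt s, hfullne s hss]
      · dsimp only
        have hSeq : pvS (p ++ [h]) cap.toNat n = pvS p cap.toNat n := by
          rw [pvS, pvS, hord]
          apply List.flatMap_congr
          intro q _
          by_cases hss : q.2 = pvGetSource h
          · have hgr : pvGrp (p ++ [h]) cap.toNat q.2 = pvGrp p cap.toNat q.2 := by
              rw [hss, pvGrp, pvGrp, hfull0, pvTake_concat, if_neg c2]
            rw [hgr]
          · rw [pvGrp, pvGrp, hfullne q.2 hss]
        rw [hSeq]
        exact hkd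
  · -- new source
    have hget : fs.get? (pvGetSource h) = none := by
      rw [PySem.Dict.get?_eq_none_iff_not_mem_keys, pvKeys_of_items hfs]
      exact c1
    have hsize : fs.size = (pvOrd p).length := by
      show fs.items.length = (pvOrd p).length
      rw [hfs, List.length_map, PySem.List.length_enumerate]
    have hfullnil : pvFull p (pvGetSource h) = [] := pvFull_nil_of_not_mem c1
    have hord : pvOrd (p ++ [h]) = pvOrd p ++ [pvGetSource h] := by
      rw [pvOrd_concat, if_neg c1]
    have hfull0 : pvFull (p ++ [h]) (pvGetSource h) = [h] := by
      rw [pvFull_concat, if_pos rfl, hfullnil, List.nil_append]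
    have hfullne : ∀ s, s ≠ pvGetSource h → pvFull (p ++ [h]) s = pvFull p s := by
      intro s hss
      rw [pvFull_concat, if_neg (fun he => hss he.symm), List.append_nil]
    have hcon : fs.contains (pvGetSource h) = false := by
      rw [PySem.Dict.contains_eq_decide_mem_keys, pvKeys_of_items hfs]
      simpa using c1
    have hitems' : (fs.insert (pvGetSource h) ((fs.size : Nat) : Int)).items =
        (PySem.List.enumerate (pvOrd (p ++ [h])) 0).map (fun q => (q.2, q.1)) := by
      rw [PySem.Dict.items_insert_of_not_contains fs _ hcon, hfs, hord,
        PySem.List.enumerate_append]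
      simp only [PySem.List.enumerate_cons, PySem.List.enumerate_nil, List.map_append,
        List.map_cons, List.map_nil]
      rw [hsize]
      simp
    have hrank0 : cnt.getD (pvGetSource h) 0 = 0 := by
      rw [hcnt _, hfullnil]
      simp
    by_cases c3 : 0 < cap
    · -- kept (cap positive): new source gets index |pvOrd p|, rank 0
      have hcap1 : 1 ≤ cap.toNat := by omega
      have hstep : pvBStep n cap (fs, cnt, kd) h =
          (fs.insert (pvGetSource h) ((fs.size : Nat) : Int),
            cnt.insert (pvGetSource h) (cnt.getD (pvGetSource h) 0 + 1),
            kd ++ [(cnt.getD (pvGetSource h) 0 * n + ((fs.size : Nat) : Int), h)]) := by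
        simp only [pvBStep, hget]
        rw [if_pos (by rw [hrank0]; omega)]
      rw [hstep]
      refine ⟨hitems', fun s => ?_, ?_⟩
      · dsimp only
        rw [PySem.Dict.getD_insert]
        by_cases hss : s = pvGetSource h
        · subst hss
          rw [if_pos rfl, hrank0, hfull0]
          simp
          omega
        · rw [if_neg hss, hcnt s, hfullne s hss]
      · dsimp only
        have hgrnew : pvGrp (p ++ [h]) cap.toNat (pvGetSource h) = [h] := by
          rw [pvGrp, hfull0, List.take_of_length_le (by simp; omega)]
        have hSeq : pvS (p ++ [h]) cap.toNat n =
            pvS p cap.toNat n ++ [(0 * n + ((pvOrd p).length : Int), h)] := by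
          rw [pvS, pvS, hord, PySem.List.enumerate_append, List.flatMap_append]
          congr 1
          · apply List.flatMap_congr
            intro q hq
            have hm : q.2 ∈ pvOrd p := pvSnd_mem_of_mem_enumerate hq
            have hss : q.2 ≠ pvGetSource h := fun he => c1 (he ▸ hm)
            rw [pvGrp, pvGrp, hfullne q.2 hss]
          · simp only [PySem.List.enumerate_cons, PySem.List.enumerate_nil, List.flatMap_cons,
              List.flatMap_nil]
            rw [hgrnew]
            simp [PySem.List.enumerate_cons]
        rw [hSeq, hrank0, hsize]
        exact hkd.append_right _
    · -- cap ≤ 0: first_seen still records the source but nothing is kept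
      have hcap0 : cap.toNat = 0 := by omega
      have hstep : pvBStep n cap (fs, cnt, kd) h =
          (fs.insert (pvGetSource h) ((fs.size : Nat) : Int), cnt, kd) := by
        simp only [pvBStep, hget]
        rw [if_neg (by rw [hrank0]; omega)]
      rw [hstep]
      refine ⟨hitems', fun s => ?_, ?_⟩
      · dsimp only
        by_cases hss : s = pvGetSource h
        · subst hss
          rw [hrank0, hfull0, hcap0]
          simp
        · rw [hcnt s, hfullne s hss]
      · dsimp only
        have hSeq : pvS (p ++ [h]) cap.toNat n = pvS p cap.toNat n := by
          rw [pvS, pvS, hord, PySem.List.enumerate_append, List.flatMap_append]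
          have hnilcol : pvGrp (p ++ [h]) cap.toNat (pvGetSource h) = [] := by
            rw [pvGrp, hcap0, List.take_zero]
          have h2 : (PySem.List.enumerate [pvGetSource h]
              (0 + ((pvOrd p).length : Int))).flatMap
              (fun q => (PySem.List.enumerate (pvGrp (p ++ [h]) cap.toNat q.2) 0).map
                (fun e => (e.1 * n + q.1, e.2))) = [] := by
            simp [PySem.List.enumerate_cons, hnilcol]
          rw [h2, List.append_nil]
          apply List.flatMap_congr
          intro q hq
          have hm : q.2 ∈ pvOrd p := pvSnd_mem_of_mem_enumerate hq
          have hss : q.2 ≠ pvGetSource h := fun he => c1 (he ▸ hm)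
          rw [pvGrp, pvGrp, hfullne q.2 hss]
        rw [hSeq]
        exact hkd

theorem pvFoldB (n cap : Int) (l : List (List (String × String))) :
    ∀ (p : List (List (String × String))) (fs cnt : PySem.Dict String Int)
      (kd : List (Int × List (String × String))), pvInvB n cap p fs cnt kd →
      pvInvB n cap (p ++ l) (l.foldl (pvBStep n cap) (fs, cnt, kd)).1
        (l.foldl (pvBStep n cap) (fs, cnt, kd)).2.1
        (l.foldl (pvBStep n cap) (fs, cnt, kd)).2.2 := by
  induction l with
  | nil => intro p fs cnt kd hi; simpa using hi
  | cons hh t ih =>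
    intro p fs cnt kd hi
    have h1 := pvStepB hi hh
    have h2 := ih (p ++ [hh]) (pvBStep n cap (fs, cnt, kd) hh).1
      (pvBStep n cap (fs, cnt, kd) hh).2.1 (pvBStep n cap (fs, cnt, kd) hh).2.2 h1
    simpa [List.append_assoc] using h2

-- a column, written as a filterMap over all capN row indices
theorem pvCol_eq_filterMap (l : List (List (String × String))) (capN : Nat) (n j : Int)
    (hl : l.length ≤ capN) :
    (PySem.List.enumerate l 0).map (fun e => (e.1 * n + j, e.2)) =
      (List.range capN).filterMap
        (fun (r : Nat) => (l[r]?).map (fun h => ((r : Int) * n + j, h))) := by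
  have hsplit : List.range capN = List.range l.length ++ List.range' l.length (capN - l.length) := by
    have hap : List.range' 0 l.length 1 ++ List.range' (0 + 1 * l.length) (capN - l.length) 1 =
        List.range' 0 (l.length + (capN - l.length)) 1 := List.range'_append
    simp only [Nat.zero_add, Nat.one_mul] at hap
    have hmn : l.length + (capN - l.length) = capN := by omega
    rw [hmn] at hap
    rw [List.range_eq_range', ← hap, ← List.range_eq_range']
  rw [hsplit, List.filterMap_append]
  have htail : (List.range' l.length (capN - l.length)).filterMap
      (fun (r : Nat) => (l[r]?).map (fun h => ((r : Int) * n + j, h))) = [] := by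
    rw [List.filterMap_eq_nil_iff]
    intro r hr
    have := (List.mem_range'_1.mp hr).1
    rw [List.getElem?_eq_none (by omega)]
    rfl
  rw [htail, List.append_nil]
  have hhead : (List.range l.length).filterMap
      (fun (r : Nat) => (l[r]?).map (fun h => ((r : Int) * n + j, h))) =
      (List.range l.length).map (fun (r : Nat) => ((r : Int) * n + j, l.getD r [])) := by
    rw [← List.filterMap_eq_map]
    apply List.filterMap_congr
    intro r hr
    have hrl : r < l.length := List.mem_range.mp hr
    rw [List.getElem?_eq_getElem hrl]
    simp [List.getD_eq_getElem?_getD, List.getElem?_eq_getElem hrl]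
  rw [hhead, PySem.List.enumerate_eq_map_pyRange l []]
  have hlen : PySem.List.len l = ((l.length : Nat) : Int) := by
    simp [PySem.List.len]
  rw [hlen, PySem.List.pyRange_zero_natCast, List.map_map, List.map_map]
  apply List.map_congr_left
  intro r hr
  have hrl : r < l.length := List.mem_range.mp hr
  simp [PySem.List.pyGetD_natCast]

-- perm of a doubly-indexed flatMap, traversed in the two orders (not in Mathlib as a List lemma)
theorem pvFlatMap_swap_perm {α β γ : Type} (l : List α) (m : List β) (g : α → β → List γ) :
    (l.flatMap fun a => m.flatMap (g a)).Perm (m.flatMap fun b => l.flatMap fun a => g a b) := by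
  induction l with
  | nil => simp
  | cons a l ih =>
    rw [List.flatMap_cons]
    have h1 : (m.flatMap fun b => (a :: l).flatMap fun a' => g a' b) =
        m.flatMap fun b => g a b ++ (l.flatMap fun a' => g a' b) := by
      apply List.flatMap_congr
      intro b _
      rw [List.flatMap_cons]
    rw [h1]
    exact (ih.append_left (m.flatMap (g a))).trans
      (List.flatMap_append_perm m (fun b => g a b) (fun b => l.flatMap fun a' => g a' b))

-- the column-wise matrix is a permutation of the row-wise one
theorem pvS_perm_pvKT (hits : List (List (String × String))) (capN : Nat) (n : Int) :
    (pvS hits capN n).Perm (pvKT hits capN n) := by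
  have hcol : pvS hits capN n =
      (PySem.List.enumerate (pvOrd hits) 0).flatMap
        (fun q => (List.range capN).flatMap
          (fun (r : Nat) => ((pvGrp hits capN q.2)[r]?.map (fun h => ((r : Int) * n + q.1, h))).toList)) := by
    rw [pvS]
    apply List.flatMap_congr
    intro q _
    rw [pvCol_eq_filterMap _ capN n q.1 (by simp [pvGrp])]
    exact List.filterMap_eq_flatMap_toList _ _
  have hrow : pvKT hits capN n =
      (List.range capN).flatMap
        (fun (r : Nat) => (PySem.List.enumerate (pvOrd hits) 0).flatMap
          (fun q => ((pvGrp hits capN q.2)[r]?.map (fun h => ((r : Int) * n + q.1, h))).toList)) := by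
    rw [pvKT]
    apply List.flatMap_congr
    intro r _
    rw [pvKRow]
    exact List.filterMap_eq_flatMap_toList _ _
  rw [hcol, hrow]
  exact pvFlatMap_swap_perm _ _ _

-- the source-order list is shorter than hits
theorem pvOrd_length_le (hits : List (List (String × String))) :
    (pvOrd hits).length ≤ hits.length := by
  have hnd := pvOrd_nodup hits
  have hsub : pvOrd hits ⊆ hits.map pvGetSource := by
    intro x hx
    exact (PySem.List.mem_dedup _ _).mp hx
  calc (pvOrd hits).length = (pvOrd hits).toFinset.card := (List.toFinset_card_of_nodup hnd).symm
    _ ≤ (hits.map pvGetSource).toFinset.card :=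
        Finset.card_le_card (fun x hx => List.mem_toFinset.mpr (hsub (List.mem_toFinset.mp hx)))
    _ ≤ (hits.map pvGetSource).length := List.toFinset_card_le _
    _ = hits.length := List.length_map ..

-- every entry of row r carries a key in [r*n, r*n + n)
theorem pvKRow_key_bounds {hits : List (List (String × String))} {capN : Nat} {n : Int}
    {r : Nat} {x : Int × List (String × String)}
    (hn : ((pvOrd hits).length : Int) ≤ n) (hx : x ∈ pvKRow hits capN n r) :
    (r : Int) * n ≤ x.1 ∧ x.1 < (r : Int) * n + n := by
  rw [pvKRow, List.mem_filterMap] at hx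
  obtain ⟨q, hq, hfx⟩ := hx
  obtain ⟨k, hk, hqe⟩ := (PySem.List.mem_enumerate_iff _ _ _).mp hq
  have hq1 : q.1 = (k : Int) := by rw [hqe]; simp
  rcases ho : (pvGrp hits capN q.2)[r]? with _ | h
  · rw [ho] at hfx; simp at hfx
  · rw [ho] at hfx
    simp only [Option.map_some, Option.some.injEq] at hfx
    have hx1 : x.1 = (r : Int) * n + q.1 := by rw [← hfx]
    have hkb : (k : Int) < ((pvOrd hits).length : Int) := by exact_mod_cast hk
    rw [hx1, hq1]
    omega

-- the row-wise matrix has strictly increasing keys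
theorem pvKT_pairwise (hits : List (List (String × String))) (capN : Nat) (n : Int)
    (hn : ((pvOrd hits).length : Int) ≤ n) (hn0 : 0 < n) :
    (pvKT hits capN n).Pairwise (fun a b => a.1 < b.1) := by
  rw [pvKT, List.flatMap_def, List.pairwise_flatten]
  constructor
  · intro l hl
    rw [List.mem_map] at hl
    obtain ⟨r, _, rfl⟩ := hl
    rw [pvKRow, List.pairwise_filterMap]
    apply (PySem.List.pairwise_lt_enumerate _ _).imp_of_mem
    intro q q' hq hq' hlt b hb b' hb'
    rcases ho : (pvGrp hits capN q.2)[r]? with _ | h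
    · rw [ho] at hb; simp at hb
    · rcases ho' : (pvGrp hits capN q'.2)[r]? with _ | h'
      · rw [ho'] at hb'; simp at hb'
      · rw [ho] at hb; rw [ho'] at hb'
        simp only [Option.map_some, Option.some.injEq] at hb hb'
        subst hb; subst hb'
        simp
        omega
  · apply (List.pairwise_lt_range (n := capN)).map
    intro r r' hrr' x hx y hy
    have hbx := pvKRow_key_bounds hn hx
    have hby := pvKRow_key_bounds hn hy
    have hr1 : ((r : Int) + 1) * n ≤ (r' : Int) * n := by
      apply mul_le_mul_of_nonneg_right _ (by omega)
      exact_mod_cast hrr'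
    nlinarith [hbx.2, hby.1]

-- row-wise payloads are exactly A's round-robin rows
theorem pvMapSnd_pvKT (hits : List (List (String × String))) (capN : Nat) (n : Int) :
    (pvKT hits capN n).map (fun e => e.2) = pvFlatFrom hits capN 0 := by
  rw [pvKT, List.map_flatMap, pvFlatFrom, Nat.sub_zero, ← List.range_eq_range']
  apply List.flatMap_congr
  intro r _
  rw [pvKRow, List.map_filterMap, pvRow]
  have hfn : (fun q : Int × String =>
      ((pvGrp hits capN q.2)[r]?.map (fun h => ((r : Int) * n + q.1, h))).map
        (fun e : Int × List (String × String) => e.2)) =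
      (fun q : Int × String => (pvGrp hits capN q.2)[r]?) := by
    funext q
    rw [Option.map_map]
    rcases (pvGrp hits capN q.2)[r]? with _ | h <;> rfl
  rw [hfn]
  conv_rhs => rw [← PySem.List.map_snd_enumerate (pvOrd hits) 0]
  rw [List.filterMap_map]
  rfl

-- B's value
theorem pvB_eq (hits : List (List (String × String))) (limit cap : Int) :
    diversify_hits_by_source_py_alt hits limit cap =
      (pvFlatFrom hits cap.toNat 0).take limit.toNat := by
  set n : Int := (hits.length : Int) + 1 with hn
  have hinit : pvInvB n cap [] PySem.Dict.empty PySem.Dict.empty [] := by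
    refine ⟨rfl, fun s => ?_, by rfl⟩
    rw [PySem.Dict.getD_empty]
    rfl
  have hinv := pvFoldB n cap hits [] PySem.Dict.empty PySem.Dict.empty [] hinit
  rw [List.nil_append] at hinv
  obtain ⟨-, -, hkd⟩ := hinv
  have hperm : (pvKT hits cap.toNat n).Perm
      ((hits.foldl (pvBStep n cap) (PySem.Dict.empty, PySem.Dict.empty, [])).2.2) :=
    ((hkd.trans (pvS_perm_pvKT hits cap.toNat n)).symm)
  have hnord : ((pvOrd hits).length : Int) ≤ n := by
    have := pvOrd_length_le hits
    rw [hn]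
    omega
  have hsorted : PySem.List.sorted
      ((hits.foldl (pvBStep n cap) (PySem.Dict.empty, PySem.Dict.empty, [])).2.2)
      (fun e => e.1) = pvKT hits cap.toNat n :=
    PySem.List.sorted_eq_of_perm_of_pairwise_lt _ _ _ hperm
      (pvKT_pairwise hits cap.toNat n hnord (by rw [hn]; omega))
  show (PySem.List.slice (PySem.List.sorted
      ((hits.foldl (pvBStep n cap) (PySem.Dict.empty, PySem.Dict.empty, [])).2.2)
      (fun e => e.1)) none (some (max limit 0))).map (fun e => e.2) = _
  rw [hsorted, PySem.List.slice_to _ (by omega : (0 : Int) ≤ max limit 0)]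
  have htn : (max limit 0).toNat = limit.toNat := by omega
  rw [htn, List.map_take, pvMapSnd_pvKT]

-- ===== VERDICT (by name: the statement is the Claim_ definition above) =====
theorem diversify_hits_by_source_py_spec : Claim_equal_diversify_hits_by_source_py := by
  intro hits limit cap _
  unfold Spec_diversify_hits_by_source_py
  rw [pvA_eq, pvB_eq]
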